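-- pv_equiv track=rewrite | github.com/iftu-syed/b-prod | proms/Doctor_Login_Page/python_scripts/script2.py | create_hover_text_for_health_type
-- ===== SOURCE A (Python) =====
-- PHYSICAL_HEALTH_QUESTIONS = {
--     "Global03": "In general, how would you rate your physical health?",
--     "Global06": "To what extent are you able to carry out your everyday physical activities such as walking, climbing stairs, carrying groceries, or moving a chair?",
--     "Global07": "How would you rate your pain on average?",
--     "Global08": "How would you rate your fatigue on average?"
-- }
--
-- MENTAL_HEALTH_QUESTIONS = {
--     "Global02": "In general, would you say your quality of life is:",
--     "Global04": "In general, how would you rate your mental health, including your mood and your ability to think?",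
--     "Global05": "In general, how would you rate your satisfaction with your social activities and relationships?",
--     "Global10": "How often have you been bothered by emotional problems such as feeling anxious, depressed, or irritable?"
-- }
--
-- def create_hover_text_for_health_type(responses, health_type, dates):
--     hover_texts = []
--     questions = PHYSICAL_HEALTH_QUESTIONS if health_type == 'physical' else MENTAL_HEALTH_QUESTIONS
--
--     for date in dates:
--         hover_text = f"<b>Date:</b> {date}<br><br>"
--         for key, response in responses.items():
--             if response.get('timestamp', '').startswith(date):
--                 hover_text += "<b>Response:</b><br>{}<br>".format("<br>".join(
--                     [f"{questions.get(q, q)}: {response.get(q, '')}" for q in questions.keys()]))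
--         hover_texts.append(hover_text)
--     return hover_texts
-- ===== SOURCE B (Python) =====
-- PHYSICAL_HEALTH_QUESTIONS = {
--     "Global03": "In general, how would you rate your physical health?",
--     "Global06": "To what extent are you able to carry out your everyday physical activities such as walking, climbing stairs, carrying groceries, or moving a chair?",
--     "Global07": "How would you rate your pain on average?",
--     "Global08": "How would you rate your fatigue on average?"
-- }
--
-- MENTAL_HEALTH_QUESTIONS = {
--     "Global02": "In general, would you say your quality of life is:",
--     "Global04": "In general, how would you rate your mental health, including your mood and your ability to think?",
--     "Global05": "In general, how would you rate your satisfaction with your social activities and relationships?",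
--     "Global10": "How often have you been bothered by emotional problems such as feeling anxious, depressed, or irritable?"
-- }
--
-- def create_hover_text_for_health_type(responses, health_type, dates):
--     questions = PHYSICAL_HEALTH_QUESTIONS if health_type == 'physical' else MENTAL_HEALTH_QUESTIONS
--     # Stage 1: format every response's block exactly once, paired with its timestamp.
--     pairs = []
--     for response in responses.values():
--         lines = "<br>".join(f"{text}: {response.get(q, '')}" for q, text in questions.items())
--         pairs.append((response.get('timestamp', ''),
--                       "<b>Response:</b><br>" + lines + "<br>"))
--     # Stage 2: one comprehension builds each date's text by joining the matching blocks.
--     return [f"<b>Date:</b> {date}<br><br>" + "".join(b for ts, b in pairs if ts.startswith(date))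
--             for date in dates]
-- ===== Notes on version B (the rewrite author's own statement) =====
-- stated objective: faster
-- what changed: B is a two-stage pipeline: it first precomputes one (timestamp, formatted block) pair per response via questions.items(), then builds each date's text as header plus a join over the matching precomputed blocks, instead of A's nested loops that reformat the block for every matching date.
import Mathlib
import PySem

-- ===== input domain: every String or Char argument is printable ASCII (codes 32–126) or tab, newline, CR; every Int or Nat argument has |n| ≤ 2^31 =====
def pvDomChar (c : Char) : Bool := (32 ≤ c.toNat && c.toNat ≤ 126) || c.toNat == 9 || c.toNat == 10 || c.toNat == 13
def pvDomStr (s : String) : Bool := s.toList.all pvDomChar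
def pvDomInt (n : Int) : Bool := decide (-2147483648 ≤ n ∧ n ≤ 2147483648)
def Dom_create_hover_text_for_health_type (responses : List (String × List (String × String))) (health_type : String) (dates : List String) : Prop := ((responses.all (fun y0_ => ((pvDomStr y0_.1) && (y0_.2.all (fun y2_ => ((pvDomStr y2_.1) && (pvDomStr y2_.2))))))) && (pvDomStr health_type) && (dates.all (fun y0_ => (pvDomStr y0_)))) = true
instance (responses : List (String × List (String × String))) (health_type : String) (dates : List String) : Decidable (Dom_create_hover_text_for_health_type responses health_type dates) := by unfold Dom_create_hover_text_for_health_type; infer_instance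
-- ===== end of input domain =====

-- B is a two-stage pipeline — precompute one (timestamp, formatted block) pair per response via
-- questions.items(), then build each date's text as header + join of matching blocks — instead of
-- A's nested loops that reformat the block for every matching date (objective: faster).

-- ===== PORT A =====
def PHYSICAL_HEALTH_QUESTIONS : PySem.Dict String String := PySem.Dict.ofList [
  ("Global03", "In general, how would you rate your physical health?"),
  ("Global06", "To what extent are you able to carry out your everyday physical activities such as walking, climbing stairs, carrying groceries, or moving a chair?"),
  ("Global07", "How would you rate your pain on average?"),
  ("Global08", "How would you rate your fatigue on average?")]

def MENTAL_HEALTH_QUESTIONS : PySem.Dict String String := PySem.Dict.ofList [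
  ("Global02", "In general, would you say your quality of life is:"),
  ("Global04", "In general, how would you rate your mental health, including your mood and your ability to think?"),
  ("Global05", "In general, how would you rate your satisfaction with your social activities and relationships?"),
  ("Global10", "How often have you been bothered by emotional problems such as feeling anxious, depressed, or irritable?")]

def create_hover_text_for_health_type (responses : List (String × List (String × String))) (health_type : String) (dates : List String) : List String :=
  let questions := if health_type == "physical" then PHYSICAL_HEALTH_QUESTIONS else MENTAL_HEALTH_QUESTIONS
  dates.foldl (fun hover_texts date =>
    let hover_text := "<b>Date:</b> " ++ date ++ "<br><br>"
    let hover_text := responses.foldl (fun ht kr =>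
      let response := PySem.Dict.mk kr.2
      if PySem.Str.startswith (response.getD "timestamp" "") date then
        ht ++ ("<b>Response:</b><br>" ++
          PySem.Str.join "<br>" (questions.keys.map (fun q => questions.getD q q ++ ": " ++ response.getD q "")) ++ "<br>")
      else ht) hover_text
    hover_texts ++ [hover_text]) []

-- ===== PORT B =====
def create_hover_text_for_health_type_alt (responses : List (String × List (String × String))) (health_type : String) (dates : List String) : List String :=
  let questions := if health_type == "physical" then PHYSICAL_HEALTH_QUESTIONS else MENTAL_HEALTH_QUESTIONS
  -- Stage 1: one (timestamp, formatted block) pair per response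
  let pairs := responses.map (fun kr =>
    let response := PySem.Dict.mk kr.2
    let lines := PySem.Str.join "<br>" (questions.items.map (fun qt => qt.2 ++ ": " ++ response.getD qt.1 ""))
    (response.getD "timestamp" "", "<b>Response:</b><br>" ++ lines ++ "<br>"))
  -- Stage 2: per date, header + join of the matching blocks
  dates.map (fun date => "<b>Date:</b> " ++ date ++ "<br><br>" ++
    PySem.Str.join "" (pairs.filterMap (fun p => if PySem.Str.startswith p.1 date then some p.2 else none)))

-- ===== PRECONDITION & SPEC =====
def Spec_create_hover_text_for_health_type (responses : List (String × List (String × String))) (health_type : String) (dates : List String) (out : List String) : Prop := out = create_hover_text_for_health_type_alt responses health_type dates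
instance (responses : List (String × List (String × String))) (health_type : String) (dates : List String) (out : List String) : Decidable (Spec_create_hover_text_for_health_type responses health_type dates out) := by unfold Spec_create_hover_text_for_health_type; infer_instance

-- ===== CLAIM (what is proved, stated in full; the proofs are below) =====
def Claim_equal_create_hover_text_for_health_type : Prop := ∀ (responses : List (String × List (String × String))) (health_type : String) (dates : List String), Dom_create_hover_text_for_health_type responses health_type dates → Spec_create_hover_text_for_health_type responses health_type dates (create_hover_text_for_health_type responses health_type dates)

-- ===== LEMMAS AND PROOFS =====

theorem pv_join_empty_cons (x : String) (l : List String) :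
    PySem.Str.join "" (x :: l) = x ++ PySem.Str.join "" l := by
  apply String.toList_inj.mp
  cases l with
  | nil => simp
  | cons y l => simp only [PySem.Str.toList_join, String.toList_append, List.map_cons,
      PySem.Chars.join_cons_cons]; simp

/-- A's guarded inner loop over the responses equals the start string followed by the
``""``-join of the kept formatted blocks. -/
theorem pv_inner (q : PySem.Dict String String) (date : String) :
    ∀ (rs : List (String × List (String × String))) (h0 : String),
    rs.foldl (fun ht kr =>
        if PySem.Str.startswith ((PySem.Dict.mk kr.2).getD "timestamp" "") date then
          ht ++ ("<b>Response:</b><br>" ++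
            PySem.Str.join "<br>" (q.keys.map (fun k => q.getD k k ++ ": " ++ (PySem.Dict.mk kr.2).getD k "")) ++ "<br>")
        else ht) h0
      = h0 ++ PySem.Str.join "" (rs.filterMap (fun kr =>
          if PySem.Str.startswith ((PySem.Dict.mk kr.2).getD "timestamp" "") date then
            some ("<b>Response:</b><br>" ++
              PySem.Str.join "<br>" (q.keys.map (fun k => q.getD k k ++ ": " ++ (PySem.Dict.mk kr.2).getD k "")) ++ "<br>")
          else none)) := by
  intro rs
  induction rs with
  | nil => intro h0; simp [PySem.Str.join]
  | cons r rs ih =>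
    intro h0
    simp only [List.foldl_cons, List.filterMap_cons]
    by_cases h : PySem.Str.startswith ((PySem.Dict.mk r.2).getD "timestamp" "") date = true
    · simp only [h, if_pos]
      rw [ih, pv_join_empty_cons, String.append_assoc]
    · simp only [eq_false_of_ne_true h, Bool.false_eq_true, if_false, ih]

/-- The keys-based formatting A writes and the items-based formatting B writes coincide
for either of the two literal question dicts. -/
theorem pv_block_eq (ht : String) (r : PySem.Dict String String) :
    PySem.Str.join "<br>" ((if ht == "physical" then PHYSICAL_HEALTH_QUESTIONS else MENTAL_HEALTH_QUESTIONS).keys.map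
      (fun k => (if ht == "physical" then PHYSICAL_HEALTH_QUESTIONS else MENTAL_HEALTH_QUESTIONS).getD k k ++ ": " ++ r.getD k ""))
    = PySem.Str.join "<br>" ((if ht == "physical" then PHYSICAL_HEALTH_QUESTIONS else MENTAL_HEALTH_QUESTIONS).items.map
      (fun qt => qt.2 ++ ": " ++ r.getD qt.1 "")) := by
  by_cases h : (ht == "physical") = true <;>
    simp [h, PHYSICAL_HEALTH_QUESTIONS, MENTAL_HEALTH_QUESTIONS, PySem.Dict.ofList,
      PySem.Dict.update, PySem.Dict.empty, PySem.Dict.insert, PySem.Dict.contains,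
      PySem.Dict.keys, PySem.Dict.getD, PySem.Dict.get?]

/-- The whole equivalence, abstract in the questions dict: A's nested fold equals B's
two-stage map, given that keys-based and items-based block formatting coincide for `q`. -/
theorem pv_main (q : PySem.Dict String String)
    (hb : ∀ r : PySem.Dict String String,
      PySem.Str.join "<br>" (q.keys.map (fun k => q.getD k k ++ ": " ++ r.getD k ""))
        = PySem.Str.join "<br>" (q.items.map (fun qt => qt.2 ++ ": " ++ r.getD qt.1 "")))
    (responses : List (String × List (String × String))) (dates : List String) :
    dates.foldl (fun hover_texts date =>
      hover_texts ++ [responses.foldl (fun ht kr =>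
        if PySem.Str.startswith ((PySem.Dict.mk kr.2).getD "timestamp" "") date then
          ht ++ ("<b>Response:</b><br>" ++
            PySem.Str.join "<br>" (q.keys.map (fun k => q.getD k k ++ ": " ++ (PySem.Dict.mk kr.2).getD k "")) ++ "<br>")
        else ht) ("<b>Date:</b> " ++ date ++ "<br><br>")]) []
    = dates.map (fun date => "<b>Date:</b> " ++ date ++ "<br><br>" ++
        PySem.Str.join "" ((responses.map (fun kr =>
          ((PySem.Dict.mk kr.2).getD "timestamp" "",
           "<b>Response:</b><br>" ++
             PySem.Str.join "<br>" (q.items.map (fun qt => qt.2 ++ ": " ++ (PySem.Dict.mk kr.2).getD qt.1 "")) ++ "<br>"))).filterMap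
          (fun p => if PySem.Str.startswith p.1 date then some p.2 else none))) := by
  rw [PySem.List.foldl_append_singleton_eq_map, List.nil_append]
  apply List.map_congr_left
  intro date _
  rw [List.filterMap_map]
  rw [pv_inner q date responses]
  congr 1
  congr 1
  apply List.filterMap_congr
  intro kr _
  by_cases h : PySem.Str.startswith ((PySem.Dict.mk kr.2).getD "timestamp" "") date = true
  · simp only [Function.comp, h, if_pos, Option.some.injEq]
    rw [hb (PySem.Dict.mk kr.2)]
  · simp only [Function.comp, eq_false_of_ne_true h, Bool.false_eq_true, if_false]

-- ===== VERDICT (by name: the statement is the Claim_ definition above) =====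
theorem create_hover_text_for_health_type_spec : Claim_equal_create_hover_text_for_health_type := by
  intro responses health_type dates _
  unfold Spec_create_hover_text_for_health_type
  unfold create_hover_text_for_health_type create_hover_text_for_health_type_alt
  exact pv_main _ (fun r => pv_block_eq health_type r) responses dates
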